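-- pv_equiv track=rewrite | github.com/RPChinhara/Competitive-Programming | party_on_cruise.py | max_guests_within_time
-- ===== SOURCE A (Python) =====
-- def max_guests_within_time(T, E, L):
--     events = []
--     current_guests = E[0] - L[0]
--     events.append(current_guests)
--
--     for i in range(1, T):
--         current_guests += E[i] - L[i]
--         events.append(current_guests)
--
--     return max(events)
-- ===== SOURCE B (Python) =====
-- def max_guests_within_time(T, E, L):
--     # Backward pass: tail = max(0, best sum of a nonempty run D[i..k]) for runs
--     # starting at i, clamped at 0; answer is D[0] plus the best (possibly empty)
--     # continuation, where D[i] = E[i] - L[i].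
--     tail = 0
--     for i in reversed(range(1, T)):
--         tail = max(0, E[i] - L[i] + tail)
--     return E[0] - L[0] + tail
-- ===== Notes on version B (the rewrite author's own statement) =====
-- stated objective: alternative
-- what changed: B replaces A's forward pass that materialises the full prefix-sum list and takes max() over it by a backward Kadane-style pass that keeps one zero-clamped accumulator tail = max(0, best nonempty run sum starting at i) and returns E[0]-L[0]+tail, never building a list or tracking a running maximum.
import Mathlib
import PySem

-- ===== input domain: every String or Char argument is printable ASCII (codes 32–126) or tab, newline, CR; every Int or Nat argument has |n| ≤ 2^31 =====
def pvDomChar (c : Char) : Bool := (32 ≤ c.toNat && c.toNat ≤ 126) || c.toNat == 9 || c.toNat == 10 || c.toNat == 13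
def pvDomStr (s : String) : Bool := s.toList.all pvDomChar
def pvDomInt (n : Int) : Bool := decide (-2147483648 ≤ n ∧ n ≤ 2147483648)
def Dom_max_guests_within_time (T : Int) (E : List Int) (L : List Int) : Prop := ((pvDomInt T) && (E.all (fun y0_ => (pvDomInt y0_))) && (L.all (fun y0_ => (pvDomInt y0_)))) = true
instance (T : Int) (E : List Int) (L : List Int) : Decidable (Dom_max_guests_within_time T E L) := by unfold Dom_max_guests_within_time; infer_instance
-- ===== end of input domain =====

-- B replaces A's forward pass (build the full prefix-sum list, then max over it) by a
-- backward pass keeping one zero-clamped accumulator, returning E[0]-L[0] + tail.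

-- ===== PORT A =====
-- literal port: events list built by appending, then max(events); the pyGetD default 0 is
-- never consulted under Pre_ (indices 0..T-1 are in range there)
def max_guests_within_time (T : Int) (E : List Int) (L : List Int) : Int :=
  let current0 := PySem.List.pyGetD E 0 0 - PySem.List.pyGetD L 0 0
  let st := (PySem.List.pyRange 1 T 1).foldl
    (fun (st : List Int × Int) i =>
      let c := st.2 + (PySem.List.pyGetD E i 0 - PySem.List.pyGetD L i 0)
      (st.1 ++ [c], c))
    ([current0], current0)
  (PySem.List.max? st.1 (fun y => y)).getD 0

-- ===== PORT B =====
-- literal port of Source B: reversed(range(1, T)) is (pyRange 1 T 1).reverse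
def max_guests_within_time_alt (T : Int) (E : List Int) (L : List Int) : Int :=
  let tail := ((PySem.List.pyRange 1 T 1).reverse).foldl
    (fun (t : Int) i => max 0 (PySem.List.pyGetD E i 0 - PySem.List.pyGetD L i 0 + t)) 0
  (PySem.List.pyGetD E 0 0 - PySem.List.pyGetD L 0 0) + tail

-- ===== PRECONDITION & SPEC =====
-- A raises IndexError exactly when E or L is empty (E[0]/L[0]) or when some index 1..T-1
-- is out of range of E or L; Pre_ excludes exactly those inputs (B raises there too).
def Pre_max_guests_within_time (T : Int) (E : List Int) (L : List Int) : Prop :=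
  E ≠ [] ∧ L ≠ [] ∧ T ≤ (E.length : Int) ∧ T ≤ (L.length : Int)
instance (T : Int) (E : List Int) (L : List Int) : Decidable (Pre_max_guests_within_time T E L) := by unfold Pre_max_guests_within_time; infer_instance
def pvWitness_max_guests_within_time : Int × List Int × List Int := (2, [3, 1], [1, 0])

def Spec_max_guests_within_time (T : Int) (E : List Int) (L : List Int) (out : Int) : Prop := out = max_guests_within_time_alt T E L
instance (T : Int) (E : List Int) (L : List Int) (out : Int) : Decidable (Spec_max_guests_within_time T E L out) := by unfold Spec_max_guests_within_time; infer_instance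

-- ===== CLAIM (what is proved, stated in full; the proofs are below) =====
def Claim_equal_max_guests_within_time : Prop := ∀ (T : Int) (E : List Int) (L : List Int), Dom_max_guests_within_time T E L → Pre_max_guests_within_time T E L → Spec_max_guests_within_time T E L (max_guests_within_time T E L)

-- ===== LEMMAS AND PROOFS =====

-- a fold over range(1, m) whose body only uses E[i]-L[i] equals the fold over the
-- zipped pairs ((E ‖ L).take m).drop 1
theorem fold_idx_eq_fold_zip {σ : Type} (g : σ → Int → σ) (E L : List Int) (m : Nat)
    (hE : m ≤ E.length) (hL : m ≤ L.length) (init : σ) :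
    (PySem.List.pyRange 1 (m : Int) 1).foldl
        (fun st i => g st (PySem.List.pyGetD E i 0 - PySem.List.pyGetD L i 0)) init
      = (((E.zip L).take m).drop 1).foldl (fun st p => g st (p.1 - p.2)) init := by
  have hlen : ((E.zip L).take m).length = m := by
    simp [List.length_zip]; omega
  have hstep :
      (PySem.List.pyRange 1 (m : Int) 1).foldl
        (fun st i => g st (PySem.List.pyGetD E i 0 - PySem.List.pyGetD L i 0)) init
      = (PySem.List.pyRange 1 (((E.zip L).take m).length : Int) 1).foldl
        (fun st i => (fun (st : σ) (p : Int × Int) => g st (p.1 - p.2)) st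
            (PySem.List.pyGetD ((E.zip L).take m) i (0, 0))) init := by
    rw [hlen]
    apply PySem.List.foldl_congr_mem
    intro acc i hi
    have hi' := PySem.List.mem_pyRange_one.mp hi
    have h0 : (0:Int) ≤ i := by omega
    have hiE : i < (E.length : Int) := by omega
    have hiL : i < (L.length : Int) := by omega
    have hiZ : i < (((E.zip L).take m).length : Int) := by omega
    rw [PySem.List.pyGetD_eq_getElem E 0 h0 hiE,
        PySem.List.pyGetD_eq_getElem L 0 h0 hiL,
        PySem.List.pyGetD_eq_getElem ((E.zip L).take m) (0,0) h0 hiZ]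
    simp [List.getElem_take, List.getElem_zip]
  rw [hstep]
  simpa using PySem.List.foldl_pyRange_pyGetD' ((E.zip L).take m) (0,0)
    (fun st p => g st (p.1 - p.2)) init (by omega : (0:Int) ≤ 1)

-- accumulating folds build maps
theorem foldl_snoc_eq_map {α : Type} (f : α → Int) (l : List α) :
    ∀ a0 : List Int, l.foldl (fun a x => a ++ [f x]) a0 = a0 ++ l.map f := by
  induction l with
  | nil => simp
  | cons x xs ih => intro a0; simp [ih]

-- the zero-clamped backward accumulator is nonnegative
theorem clampG_nonneg (ds : List Int) :
    0 ≤ ds.foldr (fun d t => max 0 (d + t)) 0 := by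
  cases ds with
  | nil => simp
  | cons d ds => simp [List.foldr_cons]

-- core invariant: max of A's appended events list equals
-- max b (c + zero-clamped backward fold of the remaining diffs)
theorem key_fold (ds : List Int) : ∀ (evs : List Int) (c b : Int),
    b ∈ evs → (∀ y ∈ evs, y ≤ b) → c ≤ b →
    (PySem.List.max?
        ((ds.foldl (fun (st : List Int × Int) d =>
            (st.1 ++ [st.2 + d], st.2 + d)) (evs, c)).1)
        (fun y => y)).getD 0
      = max b (c + ds.foldr (fun d t => max 0 (d + t)) 0) := by
  induction ds with
  | nil =>
    intro evs c b hb hub hcb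
    simp only [List.foldl_nil, List.foldr_nil]
    rcases hmax : PySem.List.max? evs (fun y => y) with _ | mx
    · exact absurd ((PySem.List.max?_eq_none_iff evs (fun y => y)).mp hmax)
        (by rintro rfl; exact (List.not_mem_nil).elim hb)
    · have hm := PySem.List.max?_mem hmax
      have h1 := PySem.List.max?_isMax hmax b hb
      have h2 := hub mx hm
      simp only [Option.getD_some]
      omega
  | cons d ds ih =>
    intro evs c b hb hub hcb
    simp only [List.foldl_cons, List.foldr_cons]
    have hG := clampG_nonneg ds
    rw [ih (evs ++ [c + d]) (c + d) (max b (c + d))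
      (by rcases le_total (c + d) b with h | h
          · rw [max_eq_left h]; exact List.mem_append_left _ hb
          · rw [max_eq_right h]; exact List.mem_append_right _ (by simp))
      (by intro y hy
          rcases List.mem_append.mp hy with h1 | h1
          · exact le_trans (hub y h1) (le_max_left _ _)
          · simp at h1; subst h1; exact le_max_right _ _)
      (le_max_right _ _)]
    omega

-- range(1, T) is range(1, max(T, 1)): empty on both sides when T ≤ 1
theorem range_eq (T : Int) : PySem.List.pyRange 1 T = PySem.List.pyRange 1 (((max T 1).toNat : Int)) := by
  by_cases h : 1 ≤ T
  · congr 1; omega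
  · rw [PySem.List.pyRange_one_eq_nil (by omega), PySem.List.pyRange_one_eq_nil (by omega)]

-- the list of diffs E[i]-L[i] for i in range(1, m) is the diff-map of the zipped tail
theorem range_map_diffs (E L : List Int) (m : Nat) (hE : m ≤ E.length) (hL : m ≤ L.length) :
    (PySem.List.pyRange 1 (m : Int) 1).map
        (fun i => PySem.List.pyGetD E i 0 - PySem.List.pyGetD L i 0)
      = (((E.zip L).take m).drop 1).map (fun p => p.1 - p.2) := by
  have h := fold_idx_eq_fold_zip (fun (a : List Int) d => a ++ [d]) E L m hE hL []
  rwa [foldl_snoc_eq_map (fun i => PySem.List.pyGetD E i 0 - PySem.List.pyGetD L i 0),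
       foldl_snoc_eq_map (fun p : Int × Int => p.1 - p.2), List.nil_append, List.nil_append] at h

-- ===== VERDICT (by name: the statement is the Claim_ definition above) =====

theorem max_guests_within_time_spec : Claim_equal_max_guests_within_time := by
  intro T E L _ hpre
  obtain ⟨hE, hL, hTE, hTL⟩ := hpre
  have hE1 : 1 ≤ E.length := List.length_pos_of_ne_nil hE
  have hL1 : 1 ≤ L.length := List.length_pos_of_ne_nil hL
  unfold Spec_max_guests_within_time max_guests_within_time max_guests_within_time_alt
  simp only []
  set m : Nat := (max T 1).toNat with hm
  have hmE : m ≤ E.length := by omega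
  have hmL : m ≤ L.length := by omega
  set d0 : Int := PySem.List.pyGetD E 0 0 - PySem.List.pyGetD L 0 0 with hd0
  set ds : List Int := (((E.zip L).take m).drop 1).map (fun p => p.1 - p.2) with hds
  -- A side: index fold → zip fold → fold over the diff list ds, then the invariant
  have hA :
      (PySem.List.max?
        (((PySem.List.pyRange 1 T 1).foldl
          (fun (st : List Int × Int) i =>
            (st.1 ++ [st.2 + (PySem.List.pyGetD E i 0 - PySem.List.pyGetD L i 0)],
             st.2 + (PySem.List.pyGetD E i 0 - PySem.List.pyGetD L i 0)))
          ([d0], d0)).1) (fun y => y)).getD 0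
      = max d0 (d0 + ds.foldr (fun d t => max 0 (d + t)) 0) := by
    rw [range_eq T,
        fold_idx_eq_fold_zip (fun (st : List Int × Int) d => (st.1 ++ [st.2 + d], st.2 + d))
          E L m hmE hmL ([d0], d0)]
    have hk := key_fold ds [d0] d0 d0 (by simp) (by simp) le_rfl
    rw [hds] at hk
    simp only [List.foldl_map] at hk
    exact hk
  -- B side: reversed-range fold → foldr over the range → foldr over ds
  have hB :
      ((PySem.List.pyRange 1 T 1).reverse).foldl
        (fun (t : Int) i => max 0 (PySem.List.pyGetD E i 0 - PySem.List.pyGetD L i 0 + t)) 0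
      = ds.foldr (fun d t => max 0 (d + t)) 0 := by
    rw [List.foldl_reverse, range_eq T, hds, ← range_map_diffs E L m hmE hmL]
    simp only [List.foldr_map]
    rw [← hm]
  have hG := clampG_nonneg ds
  rw [hA, hB]
  omega
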